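/- GENERATED by c/gen_decode.py: decode facts of the image, one per distinct instruction byte string. -/
import UserX.DecodeImage

#decode_all Vorbis.Dec
  "0f28cd"  -- movaps xmm1,xmm5
  "0f84580a0000"  -- je 10fb08
  "0f84fc0a0000"  -- je 10fa53
  "0f8895feffff"  -- js 10f6fd
  "0f8f4bffffff"  -- jg 10d7c1
  "0fb6b5d4060000"  -- movzx esi,BYTE PTR [rbp+0x6d4]
  "39ab98000000"  -- cmp DWORD PTR [rbx+0x98],ebp
  "410fb61e"  -- movzx ebx,BYTE PTR [r14]
  "4155"  -- push r13
  "4188910000c000"  -- mov BYTE PTR [r9+0xc00000],dl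
  "418b5e04"  -- mov ebx,DWORD PTR [r14+0x4]
  "41c7850000c000f1f1f1f1"  -- mov DWORD PTR [r13+0xc00000],0xf1f1f1f1
  "44016308"  -- add DWORD PTR [rbx+0x8],r12d
  "4439e3"  -- cmp ebx,r12d
  "44896d80"  -- mov DWORD PTR [rbp-0x80],r13d
  "4489f7"  -- mov edi,r14d
  "448bab84000000"  -- mov r13d,DWORD PTR [rbx+0x84]
  "4539e6"  -- cmp r14d,r12d
  "458b36"  -- mov r14d,DWORD PTR [r14]
  "4801f8"  -- add rax,rdi
  "48638528ffffff"  -- movsxd rax,DWORD PTR [rbp-0xd8]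
  "48837c241000"  -- cmp QWORD PTR [rsp+0x10],0x0
  "4889442408"  -- mov QWORD PTR [rsp+0x8],rax
  "4889e5"  -- mov rbp,rsp
  "488b7500"  -- mov rsi,QWORD PTR [rbp+0x0]
  "488d2c40"  -- lea rbp,[rax+rax*2]
  "488d7b38"  -- lea rdi,[rbx+0x38]
  "488d8c2490000000"  -- lea rcx,[rsp+0x90]
  "488dbc2420010000"  -- lea rdi,[rsp+0x120]
  "48c1e003"  -- shl rax,0x3
  "4901c5"  -- add r13,rax
  "4963ef"  -- movsxd rbp,r15d
  "498b3c24"  -- mov rdi,QWORD PTR [r12]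
  "498d7e04"  -- lea rdi,[r14+0x4]
  "49c1e405"  -- shl r12,0x5
  "4a8dbce3e8030000"  -- lea rdi,[rbx+r12*8+0x3e8]
  "4c63a568ffffff"  -- movsxd r12,DWORD PTR [rbp-0x98]
  "4c89eb"  -- mov rbx,r13
  "4c8bbd60ffffff"  -- mov r15,QWORD PTR [rbp-0xa0]
  "4d037508"  -- add r14,QWORD PTR [r13+0x8]
  "4d8d6e04"  -- lea r13,[r14+0x4]
  "660f2fc1"  -- comisd xmm0,xmm1
  "66410f7ecd"  -- movd r13d,xmm1
  "66c74500ffff"  -- mov WORD PTR [rbp+0x0],0xffff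
  "742f"  -- je 108e20
  "7523"  -- jne 10c8d1
  "7875"  -- js 11181f
  "7e36"  -- jle 10b4b9
  "807d1b00"  -- cmp BYTE PTR [rbp+0x1b],0x0
  "83c005"  -- add eax,0x5
  "894314"  -- mov DWORD PTR [rbx+0x14],eax
  "8983e8060000"  -- mov DWORD PTR [rbx+0x6e8],eax
  "8b049d00061200"  -- mov eax,DWORD PTR [rbx*4+0x120600]
  "8b6c2408"  -- mov ebp,DWORD PTR [rsp+0x8]
  "8d041b"  -- lea eax,[rbx+rbx*1]
  "bb00151200"  -- mov ebx,0x121500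
  "c1ff0f"  -- sar edi,0xf
  "c7830800c00004f3f3f3"  -- mov DWORD PTR [rbx+0xc00008],0xf3f3f304
  "e801d4feff"  -- call 100720
  "e80badffff"  -- call 100640
  "e816a6feff"  -- call 100640
  "e81ef8feff"  -- call 100800
  "e8299fffff"  -- call 113660
  "e831b9feff"  -- call 100640
  "e83c9cffff"  -- call 100640
  "e847c2feff"  -- call 1003c0
  "e8522effff"  -- call 100720
  "e85e0cffff"  -- call 100640
  "e86aeefeff"  -- call 100300
  "e87670ffff"  -- call 102e60
  "e88175ffff"  -- call 100800
  "e88cc6feff"  -- call 1008e0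
  "e895d2feff"  -- call 101520
  "e8a026ffff"  -- call 101520
  "e8ab16ffff"  -- call 100800
  "e8b3f2feff"  -- call 100560
  "e8be70ffff"  -- call 100640
  "e8c8a0feff"  -- call 100800
  "e8d266ffff"  -- call 100720
  "e8dc6affff"  -- call 100640
  "e8e666ffff"  -- call 100720
  "e8ee7cffff"  -- call 10d1c0
  "e8f8feffff"  -- call 102380
  "e919fdffff"  -- jmp 113b22
  "e963030000"  -- jmp 10fa53
  "e9b4feffff"  -- jmp 10f551
  "eb04"  -- jmp 100225
  "eb9a"  -- jmp 10456c
  "ebf4"  -- jmp 102752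
  "f20f590531d70100"  -- mulsd xmm0,QWORD PTR [rip+0x1d731]
  "f20f5e1dd0e10100"  -- divsd xmm3,QWORD PTR [rip+0x1e1d0]
  "f30f105be8"  -- movss xmm3,DWORD PTR [rbx-0x18]
  "f30f107da8"  -- movss xmm7,DWORD PTR [rbp-0x58]
  "f30f1155c0"  -- movss DWORD PTR [rbp-0x40],xmm2
  "f30f117dbc"  -- movss DWORD PTR [rbp-0x44],xmm7
  "f30f591b"  -- mulss xmm3,DWORD PTR [rbx]
  "f30f5c65f4"  -- subss xmm4,DWORD PTR [rbp-0xc]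
  "f3410f106500"  -- movss xmm4,DWORD PTR [r13+0x0]
  "f7d0"  -- not eax
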